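-- pv_equiv track=rewrite | github.com/qbittensor-labs/quantum | qbittensor/validator/shor_circuit_creation/q_runner_shor_pro.py | embed_phase_bits_full
-- ===== SOURCE A (Python) =====
-- from typing import Dict, Tuple, Optional, Any, Iterable
--
-- def normalize_backend_bits_msb_left(bits: str, *, K: int) -> str:
--     s = bits.strip().replace(" ", "")
--     if len(s) < K:
--         s = ("0" * (K - len(s))) + s
--     return s[:K]
--
-- def embed_phase_bits_full(full_bits: str, K: int, phase_to_c_map: Dict[int, int]) -> str:
--     """
--     Build a full-length MSB-left string of size K (classical register width),
--     filling only measured phase positions. c[j] maps to position (K-1-j).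
--     """
--     s = normalize_backend_bits_msb_left(full_bits, K=K)
--     arr = ["0"] * K
--     for _, j in phase_to_c_map.items():
--         pos = K - 1 - j
--         if 0 <= pos < len(s):
--             arr[pos] = s[pos]
--     return "".join(arr)
-- ===== SOURCE B (Python) =====
-- def embed_phase_bits_full(full_bits, K, phase_to_c_map):
--     # Run-length construction: sort the valid target positions, then emit the
--     # output segment by segment (a zero-gap followed by the copied bit), instead
--     # of scattering writes into a mutable width-K array.
--     s = full_bits.strip().replace(" ", "")
--     s = ("0" * (K - len(s)) + s)[:K]
--     pos = sorted({K - 1 - j for j in phase_to_c_map.values() if 0 <= K - 1 - j < len(s)})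
--     pieces = []
--     prev = 0
--     for p in pos:
--         pieces.append("0" * (p - prev))
--         pieces.append(s[p])
--         prev = p + 1
--     pieces.append("0" * (K - prev))
--     return "".join(pieces)
-- ===== Notes on version B (the rewrite author's own statement) =====
-- stated objective: alternative
-- what changed: B replaces A's scatter loop (writing into a mutable width-K array at positions derived from the map values) by run-length construction: it sorts the set of valid target positions and emits the output segment by segment as zero-gaps followed by the copied bits.
import Mathlib
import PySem

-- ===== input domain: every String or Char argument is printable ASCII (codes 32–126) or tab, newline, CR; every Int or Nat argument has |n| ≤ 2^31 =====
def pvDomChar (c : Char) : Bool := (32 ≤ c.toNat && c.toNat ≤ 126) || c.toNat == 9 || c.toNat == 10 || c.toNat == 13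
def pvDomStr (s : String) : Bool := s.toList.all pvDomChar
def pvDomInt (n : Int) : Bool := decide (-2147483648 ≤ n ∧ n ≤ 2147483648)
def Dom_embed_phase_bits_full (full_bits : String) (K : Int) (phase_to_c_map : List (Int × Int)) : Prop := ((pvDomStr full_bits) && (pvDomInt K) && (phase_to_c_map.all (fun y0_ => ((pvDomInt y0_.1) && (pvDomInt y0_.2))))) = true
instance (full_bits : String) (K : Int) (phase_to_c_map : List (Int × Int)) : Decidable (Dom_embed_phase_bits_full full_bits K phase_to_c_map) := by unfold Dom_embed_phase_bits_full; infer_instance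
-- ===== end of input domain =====

-- B replaces A's scatter loop (writes into a mutable width-K array at positions derived from
-- the map values) by run-length construction: it sorts the valid target positions and emits
-- the output segment by segment (a zero-gap, then the copied bit); objective: alternative.

-- ===== PORT A =====
-- bits.strip().replace(" ", "")  (shared first line of A's helper and of B; exact via PySem.Chars)
def pvStripped (bits : String) : List Char :=
  PySem.Chars.replace (PySem.Chars.strip bits.toList) [' '] []

-- port of A's helper normalize_backend_bits_msb_left (result as List Char; "".join at the caller)
def normalize_backend_bits_msb_left (bits : String) (K : Int) : List Char :=
  let s := pvStripped bits
  let s := if ((s.length : Int) < K) then List.replicate (K - (s.length : Int)).toNat '0' ++ s else s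
  PySem.List.slice s none (some K)   -- s[:K]

def embed_phase_bits_full (full_bits : String) (K : Int) (phase_to_c_map : List (Int × Int)) : String :=
  let s := normalize_backend_bits_msb_left full_bits K
  let arr0 : List Char := List.replicate K.toNat '0'      -- ["0"] * K  (empty for K ≤ 0, as in Python)
  let arr := (PySem.Dict.ofList phase_to_c_map).items.foldl (fun arr p =>
      let pos := K - 1 - p.2
      if 0 ≤ pos ∧ pos < (s.length : Int) then
        -- arr[pos] = s[pos]; both accesses exact under Pre_ (A raises IndexError outside it)
        PySem.List.pySetD arr pos (PySem.List.pyGetD s pos '0')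
      else arr) arr0
  String.ofList arr   -- "".join(arr), arr a list of single characters

-- ===== PORT B =====
def embed_phase_bits_full_alt (full_bits : String) (K : Int) (phase_to_c_map : List (Int × Int)) : String :=
  let s0 := pvStripped full_bits
  let s := PySem.List.slice (List.replicate (K - (s0.length : Int)).toNat '0' ++ s0) none (some K)  -- ("0"*(K-len(s)) + s)[:K]
  -- sorted({K-1-j for j in phase_to_c_map.values() if 0 <= K-1-j < len(s)})
  let pos := PySem.List.sorted (PySem.Set.ofList
      (((PySem.Dict.ofList phase_to_c_map).values.map (fun j => K - 1 - j)).filter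
        (fun p => decide (0 ≤ p) && decide (p < (s.length : Int))))) (fun x => x) false
  -- the loop over pos: pieces accumulated as a char list, prev in the second component
  let r := pos.foldl (fun (a : List Char × Int) p =>
      (a.1 ++ List.replicate (p - a.2).toNat '0' ++ [PySem.List.pyGetD s p '0'], p + 1)) ([], 0)
  String.ofList (r.1 ++ List.replicate (K - r.2).toNat '0')   -- final "0"*(K-prev); "".join

-- ===== PRECONDITION & SPEC =====
-- Pre_ excludes exactly the inputs where A raises IndexError (and nothing else): K < 0 together
-- with a map value j whose target position K-1-j falls inside the sliced string while the output
-- array is empty.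
def Pre_embed_phase_bits_full (full_bits : String) (K : Int) (phase_to_c_map : List (Int × Int)) : Prop :=
  0 ≤ K ∨ ∀ j ∈ (PySem.Dict.ofList phase_to_c_map).values,
      ¬ (0 ≤ K - 1 - j ∧ K - 1 - j < max (((pvStripped full_bits).length : Int) + K) 0)
instance (full_bits : String) (K : Int) (phase_to_c_map : List (Int × Int)) : Decidable (Pre_embed_phase_bits_full full_bits K phase_to_c_map) := by unfold Pre_embed_phase_bits_full; infer_instance

def pvWitness_embed_phase_bits_full : String × Int × (List (Int × Int)) := ("1011", 4, [(0, 1), (1, 3)])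

def Spec_embed_phase_bits_full (full_bits : String) (K : Int) (phase_to_c_map : List (Int × Int)) (out : String) : Prop := out = embed_phase_bits_full_alt full_bits K phase_to_c_map
instance (full_bits : String) (K : Int) (phase_to_c_map : List (Int × Int)) (out : String) : Decidable (Spec_embed_phase_bits_full full_bits K phase_to_c_map out) := by unfold Spec_embed_phase_bits_full; infer_instance

-- ===== CLAIM (what is proved, stated in full; the proofs are below) =====
def Claim_equal_embed_phase_bits_full : Prop := ∀ (full_bits : String) (K : Int) (phase_to_c_map : List (Int × Int)), Dom_embed_phase_bits_full full_bits K phase_to_c_map → Pre_embed_phase_bits_full full_bits K phase_to_c_map → Spec_embed_phase_bits_full full_bits K phase_to_c_map (embed_phase_bits_full full_bits K phase_to_c_map)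

-- ===== LEMMAS AND PROOFS =====

-- A's normalize and B's inline padding/truncation build the same list
lemma pvNorm_eq (bits : String) (K : Int) :
    normalize_backend_bits_msb_left bits K =
      PySem.List.slice (List.replicate (K - ((pvStripped bits).length : Int)).toNat '0' ++ pvStripped bits) none (some K) := by
  unfold normalize_backend_bits_msb_left
  by_cases h : (((pvStripped bits).length : Int) < K)
  · simp [h]
  · have : (K - ((pvStripped bits).length : Int)).toNat = 0 := by omega
    simp [h, this]

-- for K ≥ 0 the normalized string has length exactly K
lemma pvNorm_len_of_nonneg (bits : String) (K : Int) (hK : 0 ≤ K) :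
    (normalize_backend_bits_msb_left bits K).length = K.toNat := by
  unfold normalize_backend_bits_msb_left
  set s0 := pvStripped bits with hs0
  by_cases h : ((s0.length : Int) < K)
  · simp [h, PySem.List.slice, PySem.List.clampIdx]
    split_ifs <;> omega
  · simp [h, PySem.List.slice, PySem.List.clampIdx]
    split_ifs <;> omega

-- for K < 0 the normalized string has length max(len+K, 0)
lemma pvNorm_len_of_neg (bits : String) (K : Int) (hK : K < 0) :
    ((normalize_backend_bits_msb_left bits K).length : Int) =
      max (((pvStripped bits).length : Int) + K) 0 := by
  unfold normalize_backend_bits_msb_left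
  set s0 := pvStripped bits with hs0
  have h : ¬ ((s0.length : Int) < K) := by omega
  simp [h, PySem.List.slice, PySem.List.clampIdx]
  split_ifs <;> omega

-- characterization of A's scatter loop: the entry at q is s[q] when some value targets q, else untouched
lemma pvFoldA (s : List Char) (K : Int) (vals : List Int) :
    ∀ (arr : List Char), arr.length = s.length →
      (vals.foldl (fun arr j =>
          if 0 ≤ K - 1 - j ∧ K - 1 - j < (s.length : Int) then
            PySem.List.pySetD arr (K - 1 - j) (PySem.List.pyGetD s (K - 1 - j) '0')
          else arr) arr).length = s.length ∧
      ∀ (q : Nat),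
        (vals.foldl (fun arr j =>
            if 0 ≤ K - 1 - j ∧ K - 1 - j < (s.length : Int) then
              PySem.List.pySetD arr (K - 1 - j) (PySem.List.pyGetD s (K - 1 - j) '0')
            else arr) arr)[q]? =
          if (∃ j ∈ vals, (q : Int) = K - 1 - j) ∧ q < s.length then s[q]? else arr[q]? := by
  induction vals with
  | nil => intro arr h; simp [h]
  | cons j vs ih =>
    intro arr h
    simp only [List.foldl_cons]
    by_cases hc : (0 ≤ K - 1 - j ∧ K - 1 - j < (s.length : Int))
    · rw [if_pos hc]
      have hlen : (PySem.List.pySetD arr (K - 1 - j) (PySem.List.pyGetD s (K - 1 - j) '0')).length = s.length := by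
        rw [PySem.List.length_pySetD]; exact h
      obtain ⟨hl, hg⟩ := ih _ hlen
      refine ⟨hl, fun q => ?_⟩
      rw [hg q]
      rw [PySem.List.pySetD_of_nonneg _ _ hc.1]
      rw [List.getElem?_set]
      have hval : PySem.List.pyGetD s (K - 1 - j) '0' = s.getD (K - 1 - j).toNat '0' :=
        PySem.List.pyGetD_of_nonneg _ _ hc.1
      by_cases hq : ((q : Int) = K - 1 - j)
      · have hq' : (K - 1 - j).toNat = q := by omega
        have hql : q < s.length := by omega
        have hsq : s[q]? = some (s.getD q '0') := by
          simp [List.getElem?_eq_getElem hql, List.getD_eq_getElem?_getD]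
        simp only [hval, hq', if_pos (by omega : q < arr.length)]
        split_ifs with h1 h2 h2
        · rfl
        · exact absurd ⟨⟨j, by simp, hq⟩, hql⟩ h2
        · exact hsq.symm
        · exact absurd ⟨⟨j, by simp, hq⟩, hql⟩ h2
      · have hne : (K - 1 - j).toNat ≠ q := by omega
        rw [if_neg hne]
        congr 1
        simp only [List.mem_cons, eq_iff_iff]
        constructor
        · rintro ⟨⟨j', hj', he⟩, hql⟩; exact ⟨⟨j', Or.inr hj', he⟩, hql⟩
        · rintro ⟨⟨j', hj', he⟩, hql⟩
          rcases hj' with rfl | hj'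
          · exact absurd he hq
          · exact ⟨⟨j', hj', he⟩, hql⟩
    · rw [if_neg hc]
      obtain ⟨hl, hg⟩ := ih arr h
      refine ⟨hl, fun q => ?_⟩
      rw [hg q]
      congr 1
      simp only [List.mem_cons, eq_iff_iff]
      constructor
      · rintro ⟨⟨j', hj', he⟩, hql⟩; exact ⟨⟨j', Or.inr hj', he⟩, hql⟩
      · rintro ⟨⟨j', hj', he⟩, hql⟩
        rcases hj' with rfl | hj'
        · exact absurd ⟨by omega, by omega⟩ hc
        · exact ⟨⟨j', hj', he⟩, hql⟩

-- characterization of B's segment loop: over a strictly increasing list of positions in [c, n),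
-- the emitted pieces plus the trailing zero run spell out the gather map over range(c, n)
lemma pvFoldB (s : List Char) :
    ∀ (pos : List Int) (acc : List Char) (c n : Int),
      List.Pairwise (· < ·) pos → (∀ p ∈ pos, c ≤ p ∧ p < n) → c ≤ n →
      (pos.foldl (fun (a : List Char × Int) p =>
          (a.1 ++ List.replicate (p - a.2).toNat '0' ++ [PySem.List.pyGetD s p '0'], p + 1)) (acc, c)).1
        ++ List.replicate (n - (pos.foldl (fun (a : List Char × Int) p =>
          (a.1 ++ List.replicate (p - a.2).toNat '0' ++ [PySem.List.pyGetD s p '0'], p + 1)) (acc, c)).2).toNat '0'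
      = acc ++ (PySem.List.pyRange c n 1).map
          (fun q => if q ∈ pos then PySem.List.pyGetD s q '0' else '0') := by
  intro pos
  induction pos with
  | nil =>
    intro acc c n _ _ hcn
    simp [List.map_const', PySem.List.length_pyRange_one]
  | cons p ps ih =>
    intro acc c n hpw hb hcn
    have hps : List.Pairwise (· < ·) ps := hpw.of_cons
    have hlt : ∀ q ∈ ps, p < q := fun q hq => List.rel_of_pairwise_cons hpw hq
    have hpb := hb p (List.mem_cons_self ..)
    simp only [List.foldl_cons]
    rw [ih (acc ++ List.replicate (p - c).toNat '0' ++ [PySem.List.pyGetD s p '0']) (p + 1) n hps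
        (fun q hq => ⟨by have := hlt q hq; omega, (hb q (List.mem_cons_of_mem _ hq)).2⟩) (by omega)]
    rw [PySem.List.pyRange_one_append c p n (by omega) (by omega),
        PySem.List.pyRange_one_cons (show p < n by omega)]
    simp only [List.map_append, List.map_cons]
    have h1 : (PySem.List.pyRange c p 1).map
        (fun q => if q ∈ p :: ps then PySem.List.pyGetD s q '0' else '0')
        = List.replicate (p - c).toNat '0' := by
      rw [List.map_congr_left (g := fun _ => '0') ?_]
      · rw [List.map_const', PySem.List.length_pyRange_one]
      · intro q hq
        have hq' := (PySem.List.mem_pyRange_one).mp hq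
        rw [if_neg]
        intro hmem
        rcases List.mem_cons.mp hmem with rfl | hm
        · omega
        · have := hlt q hm; omega
    have h2 : (PySem.List.pyRange (p + 1) n 1).map
        (fun q => if q ∈ p :: ps then PySem.List.pyGetD s q '0' else '0')
        = (PySem.List.pyRange (p + 1) n 1).map
          (fun q => if q ∈ ps then PySem.List.pyGetD s q '0' else '0') := by
      apply List.map_congr_left
      intro q hq
      have hq' := (PySem.List.mem_pyRange_one).mp hq
      by_cases hmem : q ∈ ps
      · rw [if_pos (List.mem_cons_of_mem _ hmem), if_pos hmem]
      · rw [if_neg ?_, if_neg hmem]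
        intro hm
        rcases List.mem_cons.mp hm with rfl | hm'
        · omega
        · exact hmem hm'
    rw [h1, h2, if_pos (List.mem_cons_self ..)]
    simp [List.append_assoc]

lemma pvMain (full_bits : String) (K : Int) (m : List (Int × Int))
    (hPre : Pre_embed_phase_bits_full full_bits K m) :
    String.ofList ((PySem.Dict.ofList m).items.foldl (fun arr p =>
        if 0 ≤ K - 1 - p.2 ∧ K - 1 - p.2 < ((normalize_backend_bits_msb_left full_bits K).length : Int) then
          PySem.List.pySetD arr (K - 1 - p.2)
            (PySem.List.pyGetD (normalize_backend_bits_msb_left full_bits K) (K - 1 - p.2) '0')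
        else arr) (List.replicate K.toNat '0'))
    = (let s := PySem.List.slice
          (List.replicate (K - ((pvStripped full_bits).length : Int)).toNat '0' ++ pvStripped full_bits)
          none (some K)
       let pos := PySem.List.sorted (PySem.Set.ofList
          (((PySem.Dict.ofList m).values.map (fun j => K - 1 - j)).filter
            (fun p => decide (0 ≤ p) && decide (p < (s.length : Int))))) (fun x => x) false
       let r := pos.foldl (fun (a : List Char × Int) p =>
          (a.1 ++ List.replicate (p - a.2).toNat '0' ++ [PySem.List.pyGetD s p '0'], p + 1)) ([], 0)
       String.ofList (r.1 ++ List.replicate (K - r.2).toNat '0')) := by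
  rw [← pvNorm_eq full_bits K]
  set s := normalize_backend_bits_msb_left full_bits K with hs
  set vals := (PySem.Dict.ofList m).values with hvals
  simp only []
  set pos := PySem.List.sorted (PySem.Set.ofList
      ((vals.map (fun j => K - 1 - j)).filter
        (fun p => decide (0 ≤ p) && decide (p < (s.length : Int))))) (fun x => x) false with hpos
  have hposmem : ∀ p : Int, p ∈ pos ↔
      ((∃ j ∈ vals, p = K - 1 - j) ∧ 0 ≤ p ∧ p < (s.length : Int)) := by
    intro p
    rw [hpos, PySem.List.mem_sorted, PySem.Set.mem_ofList, List.mem_filter]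
    simp only [List.mem_map, Bool.and_eq_true, decide_eq_true_eq]
    constructor
    · rintro ⟨⟨j, hj, rfl⟩, h1, h2⟩; exact ⟨⟨j, hj, rfl⟩, h1, h2⟩
    · rintro ⟨⟨j, hj, rfl⟩, h1, h2⟩; exact ⟨⟨j, hj, rfl⟩, h1, h2⟩
  have hpw : List.Pairwise (· < ·) pos := PySem.List.sorted_ofList_pairwise_lt _
  apply congrArg String.ofList
  have hfold : (PySem.Dict.ofList m).items.foldl (fun arr p =>
      if 0 ≤ K - 1 - p.2 ∧ K - 1 - p.2 < (s.length : Int) then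
        PySem.List.pySetD arr (K - 1 - p.2) (PySem.List.pyGetD s (K - 1 - p.2) '0')
      else arr) (List.replicate K.toNat '0')
    = vals.foldl (fun arr j =>
      if 0 ≤ K - 1 - j ∧ K - 1 - j < (s.length : Int) then
        PySem.List.pySetD arr (K - 1 - j) (PySem.List.pyGetD s (K - 1 - j) '0')
      else arr) (List.replicate K.toNat '0') := by
    rw [hvals]; simp only [PySem.Dict.values]; rw [List.foldl_map]
  rw [hfold]
  by_cases hK : 0 ≤ K
  · -- K ≥ 0 : both sides spell the gather map over range(0, K)
    have hlen : (s.length : Int) = K := by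
      rw [hs, pvNorm_len_of_nonneg full_bits K hK]; omega
    rw [pvFoldB s pos [] 0 K hpw
        (fun p hp => by have := (hposmem p).mp hp; omega) hK]
    simp only [List.nil_append]
    obtain ⟨n, rfl⟩ : ∃ n : ℕ, K = (n : Int) := ⟨K.toNat, (Int.toNat_of_nonneg hK).symm⟩
    have hlen' : s.length = n := by omega
    have harr : (List.replicate ((n : Int)).toNat '0').length = s.length := by simp [hlen']
    obtain ⟨hl, hg⟩ := pvFoldA s (n : Int) vals (List.replicate ((n : Int)).toNat '0') harr
    apply List.ext_getElem?
    intro q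
    rw [hg q]
    by_cases hq : q < n
    · rw [PySem.List.getElem?_map_pyRange_zero _ _ _ hq]
      have hql : q < s.length := by omega
      have hsq : s[q]? = some (s.getD q '0') := by
        simp [List.getElem?_eq_getElem hql, List.getD_eq_getElem?_getD]
      rw [PySem.List.pyGetD_natCast]
      by_cases hex : ∃ j ∈ vals, (q : Int) = (n : Int) - 1 - j
      · rw [if_pos ⟨hex, hql⟩,
          if_pos ((hposmem (q : Int)).mpr ⟨hex, by omega, by omega⟩)]
        exact hsq
      · rw [if_neg (fun h => hex h.1),
          if_neg (fun h => hex ((hposmem (q : Int)).mp h).1)]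
        simp [List.getElem?_replicate]
        omega
    · rw [if_neg (fun h => hq (by omega : q < n))]
      rw [List.getElem?_eq_none (by simp; omega),
        List.getElem?_eq_none (by simp [PySem.List.length_pyRange_one]; omega)]
  · -- K < 0 : both sides are empty; Pre_ rules out any valid target position
    have hsl : ((s.length : Int)) = max (((pvStripped full_bits).length : Int) + K) 0 := by
      rw [hs]; exact pvNorm_len_of_neg full_bits K (by omega)
    have hnone := hPre.resolve_left hK
    -- the filtered position list is empty, so pos = []
    have hposnil : pos = [] := by
      rw [hpos]
      rw [PySem.List.sorted_eq_nil_iff]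
      have : ((vals.map (fun j => K - 1 - j)).filter
          (fun p => decide (0 ≤ p) && decide (p < (s.length : Int)))) = [] := by
        rw [List.filter_eq_nil_iff]
        rintro p hp
        obtain ⟨j, hj, rfl⟩ := List.mem_map.mp hp
        have := hnone j hj
        simp only [Bool.and_eq_true, decide_eq_true_eq, not_and]
        intro h1
        omega
      rw [this]
      rfl
    -- A's array starts empty and no write fires
    have hPre' : ∀ acc : List Char, ∀ j ∈ vals, (fun arr j =>
        if 0 ≤ K - 1 - j ∧ K - 1 - j < (s.length : Int) then
          PySem.List.pySetD arr (K - 1 - j) (PySem.List.pyGetD s (K - 1 - j) '0')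
        else arr) acc j = acc := by
      intro acc j hj
      have h2 := hnone j hj
      simp only []
      rw [hsl, if_neg h2]
    rw [PySem.List.foldl_congr_mem vals _ (fun acc _ => acc) _ hPre']
    rw [PySem.List.foldl_ignore]
    rw [hposnil]
    simp [(by omega : K.toNat = 0)]

-- ===== VERDICT (by name: the statement is the Claim_ definition above) =====
theorem embed_phase_bits_full_spec : Claim_equal_embed_phase_bits_full := by
  intro full_bits K m _ hPre
  exact pvMain full_bits K m hPre
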